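-- pv_equiv track=rewrite | github.com/laoyouqing/protocol_v2 | changing_protocol/tool/calc.py | low_high
-- ===== SOURCE A (Python) =====
-- import math
--
-- def low_high(data):
--     # 163f2109  == 09213f16
--     isetp = math.ceil(len(data) / 8)
--     repdata = ''
--     for i in range(1, isetp + 1):
--         tmp = data[(i - 1) * 8: 8 * i]
--         low = tmp[2:4] + tmp[0:2]
--         high = tmp[6:] + tmp[4:6]
--         repdata = high + low + repdata
--     return repdata
-- ===== SOURCE B (Python) =====
-- def low_high(data):
--     # Reversing the 2-char groups of the whole string is equivalent to A's
--     # 8-char chunk byte-swap plus reverse-prepend.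
--     pairs = [data[i:i + 2] for i in range(0, len(data), 2)]
--     return ''.join(reversed(pairs))
-- ===== Notes on version B (the rewrite author's own statement) =====
-- stated objective: faster
-- what changed: Replaces the 8-char chunk loop with within-chunk high/low slicing and quadratic string prepend by one pass that splits the string into 2-char pairs and joins them in reverse.
import Mathlib
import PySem

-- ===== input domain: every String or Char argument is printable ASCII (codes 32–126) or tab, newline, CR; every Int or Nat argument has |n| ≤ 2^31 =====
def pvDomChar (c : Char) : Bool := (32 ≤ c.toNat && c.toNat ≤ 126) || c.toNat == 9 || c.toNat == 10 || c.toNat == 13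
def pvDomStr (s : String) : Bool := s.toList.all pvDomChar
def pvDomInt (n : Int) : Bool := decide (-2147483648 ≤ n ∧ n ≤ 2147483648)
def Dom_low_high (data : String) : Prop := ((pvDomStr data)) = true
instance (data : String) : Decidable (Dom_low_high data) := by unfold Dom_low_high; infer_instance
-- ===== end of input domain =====

-- B replaces A's 8-char chunk byte-swap with quadratic prepend by joining the 2-char pairs in reverse (measured faster).

-- ===== PORT A =====
def low_high (data : String) : String :=
  let cs := data.toList
  -- isetp = math.ceil(len(data) / 8): exact as (n + 7) / 8 on the Nat length
  let isetp : Nat := (cs.length + 7) / 8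
  let repdata := (PySem.List.pyRange 1 ((isetp : Int) + 1) 1).foldl
    (fun repdata i =>
      let tmp := PySem.List.slice cs (some ((i - 1) * 8)) (some (8 * i))
      let low := PySem.List.slice tmp (some 2) (some 4) ++ PySem.List.slice tmp (some 0) (some 2)
      let high := PySem.List.slice tmp (some 6) none ++ PySem.List.slice tmp (some 4) (some 6)
      (high ++ low) ++ repdata) []
  String.ofList repdata

-- ===== PORT B =====
def low_high_alt (data : String) : String :=
  let cs := data.toList
  let pairs := (PySem.List.pyRange 0 (cs.length : Int) 2).map
    (fun i => PySem.List.slice cs (some i) (some (i + 2)))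
  String.ofList pairs.reverse.flatten

-- ===== PRECONDITION & SPEC =====
def Spec_low_high (data : String) (out : String) : Prop := out = low_high_alt data
instance (data : String) (out : String) : Decidable (Spec_low_high data out) := by unfold Spec_low_high; infer_instance

-- ===== CLAIM (what is proved, stated in full; the proofs are below) =====
def Claim_equal_low_high : Prop := ∀ (data : String), Dom_low_high data → Spec_low_high data (low_high data)

-- ===== LEMMAS AND PROOFS =====

-- the common value: the 2-char groups of cs, concatenated in reverse order
def revPairs : List Char → List Char
  | [] => []
  | a :: rest => revPairs (rest.drop 1) ++ a :: rest.take 1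
termination_by xs => xs.length
decreasing_by simp

lemma revPairs_nil : revPairs [] = [] := by rw [revPairs]

lemma revPairs_eq (xs : List Char) : revPairs xs = revPairs (xs.drop 2) ++ xs.take 2 := by
  cases xs with
  | nil => simp [revPairs_nil]
  | cons a rest => rw [revPairs]; simp [List.drop_one]

-- A's per-chunk transform, in drop/take form
def gA (tmp : List Char) : List Char :=
  (tmp.drop 6 ++ (tmp.drop 4).take 2) ++ ((tmp.drop 2).take 2 ++ tmp.take 2)

lemma foldl_prepend {α β : Type} (g : α → List β) (l : List α) :
    ∀ (init : List β),
      l.foldl (fun acc i => g i ++ acc) init = (l.map g).reverse.flatten ++ init := by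
  induction l with
  | nil => intro init; simp
  | cons a t ih => intro init; simp [List.foldl_cons, ih, List.append_assoc]

lemma revPairs_step8 (cs : List Char) :
    revPairs cs = revPairs (cs.drop 8) ++ gA (cs.take 8) := by
  conv_lhs => rw [revPairs_eq cs, revPairs_eq (cs.drop 2),
    revPairs_eq ((cs.drop 2).drop 2), revPairs_eq (((cs.drop 2).drop 2).drop 2)]
  simp [gA, List.drop_drop, List.drop_take, List.take_take, List.append_assoc]

lemma chunk8_eq (n : Nat) : ∀ cs : List Char, cs.length ≤ n →
    ((List.range ((cs.length + 7) / 8)).map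
      (fun k => gA ((cs.drop (8 * k)).take 8))).reverse.flatten = revPairs cs := by
  induction n with
  | zero =>
      intro cs h
      have : cs = [] := List.eq_nil_of_length_eq_zero (Nat.le_zero.mp h)
      subst this; rw [revPairs_nil]; rfl
  | succ n ih =>
      intro cs h
      by_cases h0 : cs.length = 0
      · have : cs = [] := List.eq_nil_of_length_eq_zero h0
        subst this; rw [revPairs_nil]; rfl
      · have hm : (cs.length + 7) / 8 = ((cs.drop 8).length + 7) / 8 + 1 := by
          simp [List.length_drop]; omega
        have hlen : (cs.drop 8).length ≤ n := by simp [List.length_drop]; omega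
        have hmap : ∀ k ∈ List.range (((cs.drop 8).length + 7) / 8),
            ((fun k => gA ((cs.drop (8 * k)).take 8)) ∘ Nat.succ) k
              = (fun k => gA (((cs.drop 8).drop (8 * k)).take 8)) k := by
          intro k _
          show gA ((cs.drop (8 * Nat.succ k)).take 8) = gA (((cs.drop 8).drop (8 * k)).take 8)
          have hdk : cs.drop (8 * Nat.succ k) = (cs.drop 8).drop (8 * k) := by
            rw [List.drop_drop]; congr 1; omega
          rw [hdk]
        rw [hm, List.range_succ_eq_map, List.map_cons, List.map_map, List.reverse_cons,
          List.flatten_append, List.flatten_cons, List.flatten_nil, List.append_nil,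
          List.map_congr_left hmap, ih _ hlen, revPairs_step8 cs]
        simp

lemma chunk2_eq (n : Nat) : ∀ cs : List Char, cs.length ≤ n →
    ((List.range ((cs.length + 1) / 2)).map
      (fun k => (cs.drop (2 * k)).take 2)).reverse.flatten = revPairs cs := by
  induction n with
  | zero =>
      intro cs h
      have : cs = [] := List.eq_nil_of_length_eq_zero (Nat.le_zero.mp h)
      subst this; rw [revPairs_nil]; rfl
  | succ n ih =>
      intro cs h
      by_cases h0 : cs.length = 0
      · have : cs = [] := List.eq_nil_of_length_eq_zero h0
        subst this; rw [revPairs_nil]; rfl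
      · have hm : (cs.length + 1) / 2 = ((cs.drop 2).length + 1) / 2 + 1 := by
          simp [List.length_drop]; omega
        have hlen : (cs.drop 2).length ≤ n := by simp [List.length_drop]; omega
        have hmap : ∀ k ∈ List.range (((cs.drop 2).length + 1) / 2),
            ((fun k => (cs.drop (2 * k)).take 2) ∘ Nat.succ) k
              = (fun k => ((cs.drop 2).drop (2 * k)).take 2) k := by
          intro k _
          show (cs.drop (2 * Nat.succ k)).take 2 = ((cs.drop 2).drop (2 * k)).take 2
          have hdk : cs.drop (2 * Nat.succ k) = (cs.drop 2).drop (2 * k) := by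
            rw [List.drop_drop]; congr 1; omega
          rw [hdk]
        rw [hm, List.range_succ_eq_map, List.map_cons, List.map_map, List.reverse_cons,
          List.flatten_append, List.flatten_cons, List.flatten_nil, List.append_nil,
          List.map_congr_left hmap, ih _ hlen, revPairs_eq cs]
        simp

lemma portA_list (cs : List Char) :
    (PySem.List.pyRange 1 (((((cs.length + 7) / 8 : Nat)) : Int) + 1) 1).foldl
      (fun repdata i =>
        (((PySem.List.slice (PySem.List.slice cs (some ((i - 1) * 8)) (some (8 * i))) (some 6) none ++
           PySem.List.slice (PySem.List.slice cs (some ((i - 1) * 8)) (some (8 * i))) (some 4) (some 6)) ++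
          (PySem.List.slice (PySem.List.slice cs (some ((i - 1) * 8)) (some (8 * i))) (some 2) (some 4) ++
           PySem.List.slice (PySem.List.slice cs (some ((i - 1) * 8)) (some (8 * i))) (some 0) (some 2))) ++
         repdata)) []
    = revPairs cs := by
  rw [PySem.List.pyRange_one]
  have h1 : ((((cs.length + 7) / 8 : Nat) : Int) + 1 - 1).toNat = (cs.length + 7) / 8 := by omega
  rw [h1, List.foldl_map, foldl_prepend (fun k : Nat =>
    (PySem.List.slice (PySem.List.slice cs (some ((1 + (k : Int) - 1) * 8)) (some (8 * (1 + (k : Int))))) (some 6) none ++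
     PySem.List.slice (PySem.List.slice cs (some ((1 + (k : Int) - 1) * 8)) (some (8 * (1 + (k : Int))))) (some 4) (some 6)) ++
    (PySem.List.slice (PySem.List.slice cs (some ((1 + (k : Int) - 1) * 8)) (some (8 * (1 + (k : Int))))) (some 2) (some 4) ++
     PySem.List.slice (PySem.List.slice cs (some ((1 + (k : Int) - 1) * 8)) (some (8 * (1 + (k : Int))))) (some 0) (some 2)))]
  have hfun : ∀ k ∈ List.range ((cs.length + 7) / 8),
      (fun k : Nat =>
        (PySem.List.slice (PySem.List.slice cs (some ((1 + (k : Int) - 1) * 8)) (some (8 * (1 + (k : Int))))) (some 6) none ++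
         PySem.List.slice (PySem.List.slice cs (some ((1 + (k : Int) - 1) * 8)) (some (8 * (1 + (k : Int))))) (some 4) (some 6)) ++
        (PySem.List.slice (PySem.List.slice cs (some ((1 + (k : Int) - 1) * 8)) (some (8 * (1 + (k : Int))))) (some 2) (some 4) ++
         PySem.List.slice (PySem.List.slice cs (some ((1 + (k : Int) - 1) * 8)) (some (8 * (1 + (k : Int))))) (some 0) (some 2))) k
      = (fun k : Nat => gA ((cs.drop (8 * k)).take 8)) k := by
    intro k _
    beta_reduce
    have e1 : (1 + (k : Int) - 1) * 8 = ((8 * k : Nat) : Int) := by push_cast; ring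
    have e2 : (8 : Int) * (1 + (k : Int)) = ((8 * k + 8 : Nat) : Int) := by push_cast; ring
    show _ = gA ((cs.drop (8 * k)).take 8)
    rw [e1, e2, PySem.List.slice_natCast]
    have e3 : 8 * k + 8 - 8 * k = 8 := by omega
    rw [e3]
    rw [PySem.List.slice_from _ (by norm_num),
        PySem.List.slice_toNat _ (by norm_num : (0:Int) ≤ 4) (by norm_num),
        PySem.List.slice_toNat _ (by norm_num : (0:Int) ≤ 2) (by norm_num),
        PySem.List.slice_toNat _ (by norm_num : (0:Int) ≤ 0) (by norm_num)]
    show _ = gA ((cs.drop (8 * k)).take 8)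
    simp [gA]
  rw [List.map_congr_left hfun, List.append_nil]
  exact chunk8_eq cs.length cs (le_refl _)

lemma portB_list (cs : List Char) :
    (((PySem.List.pyRange 0 (cs.length : Int) 2).map
      (fun i => PySem.List.slice cs (some i) (some (i + 2)))).reverse).flatten
    = revPairs cs := by
  rw [PySem.List.pyRange_of_pos 0 (cs.length : Int) (by norm_num)]
  have hn : (if (0 : Int) < (cs.length : Int) then (((cs.length : Int) - 0 + 2 - 1) / 2).toNat else 0)
      = (cs.length + 1) / 2 := by
    by_cases h0 : cs.length = 0
    · simp [h0]
    · have hpos : (0 : Int) < (cs.length : Int) := by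
        exact_mod_cast Nat.pos_of_ne_zero h0
      rw [if_pos hpos]
      omega
  rw [hn, List.map_map]
  have hfun : ∀ k ∈ List.range ((cs.length + 1) / 2),
      ((fun i => PySem.List.slice cs (some i) (some (i + 2))) ∘ fun k : Nat => (0 : Int) + 2 * (k : Int)) k
        = (fun k : Nat => (cs.drop (2 * k)).take 2) k := by
    intro k _
    have e1 : (0 : Int) + 2 * (k : Int) = ((2 * k : Nat) : Int) := by push_cast; ring
    have e2 : (0 : Int) + 2 * (k : Int) + 2 = ((2 * k + 2 : Nat) : Int) := by push_cast; ring
    show PySem.List.slice cs (some ((0 : Int) + 2 * (k : Int))) (some ((0 : Int) + 2 * (k : Int) + 2))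
        = (cs.drop (2 * k)).take 2
    rw [e2, e1, PySem.List.slice_natCast]
    congr 1
    omega
  rw [List.map_congr_left hfun]
  exact chunk2_eq cs.length cs (le_refl _)

-- ===== VERDICT (by name: the statement is the Claim_ definition above) =====
theorem low_high_spec : Claim_equal_low_high := by
  intro data _
  unfold Spec_low_high low_high low_high_alt
  show String.ofList
      ((PySem.List.pyRange 1 ((((data.toList.length + 7) / 8 : Nat) : Int) + 1) 1).foldl
        (fun repdata i =>
          (((PySem.List.slice (PySem.List.slice data.toList (some ((i - 1) * 8)) (some (8 * i))) (some 6) none ++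
             PySem.List.slice (PySem.List.slice data.toList (some ((i - 1) * 8)) (some (8 * i))) (some 4) (some 6)) ++
            (PySem.List.slice (PySem.List.slice data.toList (some ((i - 1) * 8)) (some (8 * i))) (some 2) (some 4) ++
             PySem.List.slice (PySem.List.slice data.toList (some ((i - 1) * 8)) (some (8 * i))) (some 0) (some 2))) ++
           repdata)) [])
    = String.ofList
      (((PySem.List.pyRange 0 (data.toList.length : Int) 2).map
        (fun i => PySem.List.slice data.toList (some i) (some (i + 2)))).reverse).flatten
  rw [portA_list data.toList, portB_list data.toList]
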